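-- pv_equiv track=rewrite | github.com/joaobernardo23/Wordle | wordle.py | solution_letters
-- ===== SOURCE A (Python) =====
-- def solution_letters(sol):
--
--     dict = {}
--
--     for i in range(5):
--
--         counter = 0
--         for j in range(5):
--
--             if (sol[i] == sol[j] and i!=j):
--                 counter  += 1
--
--             if counter!=0:
--
--                 dict[sol[i]] = counter
--
--
--     return dict
-- ===== SOURCE B (Python) =====
-- def solution_letters(sol):
--     counts = {}
--     for i in range(5):
--         c = sol[i]
--         counts[c] = counts.get(c, 0) + 1
--     return {c: n - 1 for c, n in counts.items() if n > 1}
-- ===== Notes on version B (the rewrite author's own statement) =====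
-- stated objective: simpler
-- what changed: A's nested 5x5 position-by-position comparison loop with incremental dict overwrites is replaced by one counting pass over the five letters followed by a single filtering comprehension that keeps letters with count > 1 mapped to count-1.
import Mathlib
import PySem

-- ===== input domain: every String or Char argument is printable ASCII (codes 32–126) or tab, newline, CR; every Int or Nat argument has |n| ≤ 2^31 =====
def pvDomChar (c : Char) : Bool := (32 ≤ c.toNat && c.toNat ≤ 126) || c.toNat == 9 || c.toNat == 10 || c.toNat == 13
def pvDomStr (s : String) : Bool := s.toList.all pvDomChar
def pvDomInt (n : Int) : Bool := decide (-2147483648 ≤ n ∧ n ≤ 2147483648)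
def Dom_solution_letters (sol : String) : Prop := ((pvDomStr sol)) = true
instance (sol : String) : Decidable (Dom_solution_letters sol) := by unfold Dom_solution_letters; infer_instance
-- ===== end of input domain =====

-- B replaces A's nested position-by-position duplicate scan with one counting pass over the
-- five letters plus a filter of the count table (objective: simpler).


-- ===== PORT A =====
-- sol[i]/sol[j] is ported as the total pyGetD form; Pre_ guarantees every access is in range,
-- exactly where the Python returns without an IndexError.
def solution_letters (sol : String) : List (String × Int) :=
  ((PySem.List.pyRange 0 5 1).foldl (fun (d : PySem.Dict String Int) i =>
      ((PySem.List.pyRange 0 5 1).foldl (fun (st : Int × PySem.Dict String Int) j =>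
          let counter : Int :=
            if PySem.List.pyGetD sol.toList i ' ' = PySem.List.pyGetD sol.toList j ' ' ∧ i ≠ j
            then st.1 + 1 else st.1
          (counter,
           if counter ≠ 0
           then st.2.insert (String.ofList [PySem.List.pyGetD sol.toList i ' ']) counter
           else st.2)) (0, d)).2)
    PySem.Dict.empty).items

-- ===== PORT B =====
def solution_letters_alt (sol : String) : List (String × Int) :=
  let counts := (PySem.List.pyRange 0 5 1).foldl (fun (d : PySem.Dict String Int) i =>
      let c := String.ofList [PySem.List.pyGetD sol.toList i ' ']
      d.insert c (d.getD c 0 + 1)) PySem.Dict.empty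
  (counts.items.filter (fun p => 1 < p.2)).map (fun p => (p.1, p.2 - 1))

-- ===== PRECONDITION & SPEC =====
-- The Python raises IndexError iff len(sol) < 5 (it reads exactly sol[0..4]).
def Pre_solution_letters (sol : String) : Prop := 5 ≤ sol.toList.length
instance (sol : String) : Decidable (Pre_solution_letters sol) := by unfold Pre_solution_letters; infer_instance
def pvWitness_solution_letters : String := "abcba"

def Spec_solution_letters (sol : String) (out : List (String × Int)) : Prop := out = solution_letters_alt sol
instance (sol : String) (out : List (String × Int)) : Decidable (Spec_solution_letters sol out) := by unfold Spec_solution_letters; infer_instance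

-- ===== CLAIM (what is proved, stated in full; the proofs are below) =====
def Claim_equal_solution_letters : Prop := ∀ (sol : String), Dom_solution_letters sol → Pre_solution_letters sol → Spec_solution_letters sol (solution_letters sol)

-- ===== LEMMAS AND PROOFS =====

theorem ofList_singleton_inj (a b : Char) : String.ofList [a] = String.ofList [b] ↔ a = b := by
  constructor
  · intro h; have := congrArg String.toList h; simpa using this
  · intro h; rw [h]

-- A's inner j-loop: the counter ends as the number of matching positions, and the dict ends
-- with key x bound to that final counter iff it became nonzero.
theorem inner_loop_eq (x : String) (js : List Int) (q : Int → Prop) [DecidablePred q]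
    (d : PySem.Dict String Int) :
    js.foldl (fun (st : Int × PySem.Dict String Int) j =>
        let counter : Int := if q j then st.1 + 1 else st.1
        (counter, if counter ≠ 0 then st.2.insert x counter else st.2)) (0, d)
      = ((js.countP (fun j => decide (q j)) : Int),
         if (js.countP (fun j => decide (q j)) : Int) = 0 then d
         else d.insert x (js.countP (fun j => decide (q j)) : Int)) := by
  induction js using List.reverseRecOn with
  | nil => simp
  | append_singleton js j ih =>
    rw [List.foldl_append, ih]
    simp only [List.foldl_cons, List.foldl_nil, List.countP_append, List.countP_singleton]
    by_cases hq : q j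
    · have hn : (0:Int) ≤ (js.countP (fun j => decide (q j)) : Int) := by positivity
      simp only [hq, if_true, decide_true]
      by_cases h0 : (js.countP (fun j => decide (q j)) : Int) = 0
      · simp [h0]
      · simp only [h0, if_false]
        have : ((js.countP (fun j => decide (q j)) : Int) + 1) ≠ 0 := by omega
        push_cast
        simp [this, PySem.Dict.insert_insert_self]
    · simp only [hq, if_false, decide_false]
      by_cases h0 : (js.countP (fun j => decide (q j)) : Int) = 0
      · simp [h0]
      · simp only [if_neg (by decide : ¬(false = true)), add_zero, ne_eq, h0,
          not_false_iff, if_true, if_false, PySem.Dict.insert_insert_self]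

-- A conditional insert loop whose guard and value depend only on the key: its items are the
-- deduplicated kept keys paired with their values.
theorem foldl_guarded_insert_items {κ ν : Type} [BEq κ] [LawfulBEq κ]
    (l : List κ) (p : κ → Prop) [DecidablePred p] (v : κ → ν) :
    ((l.foldl (fun (d : PySem.Dict κ ν) x => if p x then d.insert x (v x) else d)
        PySem.Dict.empty).items)
      = ((PySem.Set.ofList l).filter (fun x => decide (p x))).map (fun x => (x, v x)) := by
  induction l using List.reverseRecOn with
  | nil => simp [PySem.Dict.empty]
  | append_singleton l x ih =>
    rw [List.foldl_append, List.foldl_cons, List.foldl_nil, PySem.Set.ofList_append_singleton]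
    by_cases hp : p x
    · by_cases hx : x ∈ PySem.Set.ofList l
      · rw [PySem.Set.add_of_mem hx]
        have hcont : (l.foldl (fun (d : PySem.Dict κ ν) x => if p x then d.insert x (v x) else d)
            PySem.Dict.empty).contains x = true := by
          rw [PySem.Dict.contains_iff_mem_keys]
          simp only [PySem.Dict.keys, ih, List.map_map]
          refine List.mem_map.2 ⟨x, ?_, rfl⟩
          exact List.mem_filter.2 ⟨hx, by simpa using hp⟩
        rw [if_pos hp, PySem.Dict.items_insert_of_contains _ _ hcont, ih]
        rw [List.map_map]
        refine List.map_congr_left ?_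
        intro k hk
        by_cases hkx : k = x
        · subst hkx; simp
        · simp [hkx]
      · rw [PySem.Set.add_of_not_mem hx]
        have hcont : (l.foldl (fun (d : PySem.Dict κ ν) x => if p x then d.insert x (v x) else d)
            PySem.Dict.empty).contains x = false := by
          rw [← Bool.not_eq_true, PySem.Dict.contains_iff_mem_keys]
          simp only [PySem.Dict.keys, ih, List.map_map]
          intro hmem
          rcases List.mem_map.1 hmem with ⟨k, hk, hkx⟩
          exact hx (by simpa [← hkx] using (List.mem_filter.1 hk).1)
        rw [if_pos hp, PySem.Dict.items_insert_of_not_contains _ _ hcont, ih,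
          List.filter_append, List.map_append]
        simp [hp]
    · by_cases hx : x ∈ PySem.Set.ofList l
      · rw [PySem.Set.add_of_mem hx, if_neg hp, ih]
      · rw [PySem.Set.add_of_not_mem hx, if_neg hp, ih, List.filter_append]
        simp [hp]

theorem ite_zero_flip (a : Int) (d e : PySem.Dict String Int) :
    (if a = 0 then d else e) = if a ≠ 0 then e else d := by
  by_cases h : a = 0 <;> simp [h]

-- ===== VERDICT (by name: the statement is the Claim_ definition above) =====
theorem solution_letters_spec : Claim_equal_solution_letters := by
  intro sol _ hpre
  unfold Spec_solution_letters
  unfold Pre_solution_letters at hpre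
  obtain ⟨c0, c1, c2, c3, c4, rest, hl⟩ :
      ∃ c0 c1 c2 c3 c4 rest, sol.toList = c0 :: c1 :: c2 :: c3 :: c4 :: rest := by
    rcases hL : sol.toList with _ | ⟨a, _ | ⟨b, _ | ⟨c, _ | ⟨d, _ | ⟨e, r⟩⟩⟩⟩⟩ <;>
      first
        | exact ⟨a, b, c, d, e, r, rfl⟩
        | (exfalso; rw [hL] at hpre; simp at hpre)
  have hr : PySem.List.pyRange 0 5 1 = [0, 1, 2, 3, 4] := by decide
  have g0 : PySem.List.pyGetD (c0 :: c1 :: c2 :: c3 :: c4 :: rest) (0 : Int) ' ' = c0 := by simp [PySem.List.pyGetD_ofNat', List.getD]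
  have g1 : PySem.List.pyGetD (c0 :: c1 :: c2 :: c3 :: c4 :: rest) (1 : Int) ' ' = c1 := by simp [PySem.List.pyGetD_ofNat', List.getD]
  have g2 : PySem.List.pyGetD (c0 :: c1 :: c2 :: c3 :: c4 :: rest) (2 : Int) ' ' = c2 := by simp [PySem.List.pyGetD_ofNat', List.getD]
  have g3 : PySem.List.pyGetD (c0 :: c1 :: c2 :: c3 :: c4 :: rest) (3 : Int) ' ' = c3 := by simp [PySem.List.pyGetD_ofNat', List.getD]
  have g4 : PySem.List.pyGetD (c0 :: c1 :: c2 :: c3 :: c4 :: rest) (4 : Int) ' ' = c4 := by simp [PySem.List.pyGetD_ofNat', List.getD]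
  have hks : [String.ofList [c0], String.ofList [c1], String.ofList [c2], String.ofList [c3],
      String.ofList [c4]]
      = List.map (fun i : Int =>
          String.ofList [PySem.List.pyGetD (c0 :: c1 :: c2 :: c3 :: c4 :: rest) i ' '])
          [0, 1, 2, 3, 4] := by
    simp only [List.map_cons, List.map_nil, g0, g1, g2, g3, g4]
  -- the five one-letter strings and the count of each among them
  have hc0 : ((List.countP (fun j => decide (c0 = PySem.List.pyGetD
        (c0 :: c1 :: c2 :: c3 :: c4 :: rest) j ' ' ∧ (0 : Int) ≠ j)) [0, 1, 2, 3, 4] : Nat) : Int)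
      = ((List.count (String.ofList [c0]) [String.ofList [c0], String.ofList [c1],
          String.ofList [c2], String.ofList [c3], String.ofList [c4]] : Nat) : Int) - 1 := by
    simp only [List.countP_cons, List.countP_nil, List.count_cons, List.count_nil,
      g0, g1, g2, g3, g4, beq_iff_eq, ofList_singleton_inj]
    norm_num
    try simp [eq_comm]
  have hc1 : ((List.countP (fun j => decide (c1 = PySem.List.pyGetD
        (c0 :: c1 :: c2 :: c3 :: c4 :: rest) j ' ' ∧ (1 : Int) ≠ j)) [0, 1, 2, 3, 4] : Nat) : Int)
      = ((List.count (String.ofList [c1]) [String.ofList [c0], String.ofList [c1],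
          String.ofList [c2], String.ofList [c3], String.ofList [c4]] : Nat) : Int) - 1 := by
    simp only [List.countP_cons, List.countP_nil, List.count_cons, List.count_nil,
      g0, g1, g2, g3, g4, beq_iff_eq, ofList_singleton_inj]
    norm_num
    try simp [eq_comm]
    try (split_ifs <;> omega)
  have hc2 : ((List.countP (fun j => decide (c2 = PySem.List.pyGetD
        (c0 :: c1 :: c2 :: c3 :: c4 :: rest) j ' ' ∧ (2 : Int) ≠ j)) [0, 1, 2, 3, 4] : Nat) : Int)
      = ((List.count (String.ofList [c2]) [String.ofList [c0], String.ofList [c1],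
          String.ofList [c2], String.ofList [c3], String.ofList [c4]] : Nat) : Int) - 1 := by
    simp only [List.countP_cons, List.countP_nil, List.count_cons, List.count_nil,
      g0, g1, g2, g3, g4, beq_iff_eq, ofList_singleton_inj]
    norm_num
    try simp [eq_comm]
    try (split_ifs <;> omega)
  have hc3 : ((List.countP (fun j => decide (c3 = PySem.List.pyGetD
        (c0 :: c1 :: c2 :: c3 :: c4 :: rest) j ' ' ∧ (3 : Int) ≠ j)) [0, 1, 2, 3, 4] : Nat) : Int)
      = ((List.count (String.ofList [c3]) [String.ofList [c0], String.ofList [c1],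
          String.ofList [c2], String.ofList [c3], String.ofList [c4]] : Nat) : Int) - 1 := by
    simp only [List.countP_cons, List.countP_nil, List.count_cons, List.count_nil,
      g0, g1, g2, g3, g4, beq_iff_eq, ofList_singleton_inj]
    norm_num
    try simp [eq_comm]
    try (split_ifs <;> omega)
  have hc4 : ((List.countP (fun j => decide (c4 = PySem.List.pyGetD
        (c0 :: c1 :: c2 :: c3 :: c4 :: rest) j ' ' ∧ (4 : Int) ≠ j)) [0, 1, 2, 3, 4] : Nat) : Int)
      = ((List.count (String.ofList [c4]) [String.ofList [c0], String.ofList [c1],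
          String.ofList [c2], String.ofList [c3], String.ofList [c4]] : Nat) : Int) - 1 := by
    simp only [List.countP_cons, List.countP_nil, List.count_cons, List.count_nil,
      g0, g1, g2, g3, g4, beq_iff_eq, ofList_singleton_inj]
    norm_num
    try simp [eq_comm]
    try (split_ifs <;> omega)
  -- A's value, as a guarded insert of duplicate counts over the five letters
  have hA : solution_letters sol
      = (([String.ofList [c0], String.ofList [c1], String.ofList [c2], String.ofList [c3],
          String.ofList [c4]].foldl
          (fun (d : PySem.Dict String Int) x =>
            if ((List.count x [String.ofList [c0], String.ofList [c1], String.ofList [c2],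
                String.ofList [c3], String.ofList [c4]] : Int) - 1) ≠ 0
            then d.insert x ((List.count x [String.ofList [c0], String.ofList [c1],
                String.ofList [c2], String.ofList [c3], String.ofList [c4]] : Int) - 1)
            else d)
          PySem.Dict.empty).items) := by
    unfold solution_letters
    rw [hl, hr]
    simp only [inner_loop_eq]
    conv_rhs => rw [hks, List.foldl_map]
    refine congrArg PySem.Dict.items (PySem.List.foldl_congr_mem _ _ _ _ ?_)
    intro d i hi
    fin_cases hi
    · simp only [List.map_cons, List.map_nil, g0, g1, g2, g3, g4]
      rw [hc0, ite_zero_flip]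
    · simp only [List.map_cons, List.map_nil, g0, g1, g2, g3, g4]
      rw [hc1, ite_zero_flip]
    · simp only [List.map_cons, List.map_nil, g0, g1, g2, g3, g4]
      rw [hc2, ite_zero_flip]
    · simp only [List.map_cons, List.map_nil, g0, g1, g2, g3, g4]
      rw [hc3, ite_zero_flip]
    · simp only [List.map_cons, List.map_nil, g0, g1, g2, g3, g4]
      rw [hc4, ite_zero_flip]
  -- B's value, via the counter of the five letters
  have hB : solution_letters_alt sol
      = (((PySem.Dict.counter [String.ofList [c0], String.ofList [c1], String.ofList [c2],
          String.ofList [c3], String.ofList [c4]]).items.filter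
            (fun p => decide (1 < p.2))).map (fun p => (p.1, p.2 - 1))) := by
    unfold solution_letters_alt
    rw [hl, hr, ← PySem.Dict.foldl_insert_getD_add_one_eq_counter]
    conv_rhs => rw [hks, List.foldl_map]
  rw [hA, hB,
    foldl_guarded_insert_items _
      (fun x => ((List.count x [String.ofList [c0], String.ofList [c1], String.ofList [c2],
          String.ofList [c3], String.ofList [c4]] : Int) - 1) ≠ 0)
      (fun x => (List.count x [String.ofList [c0], String.ofList [c1], String.ofList [c2],
          String.ofList [c3], String.ofList [c4]] : Int) - 1),
    PySem.Dict.items_counter, List.filter_map, List.map_map]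
  rw [List.filter_congr (q := fun x => decide ((1 : Int) <
      (List.count x [String.ofList [c0], String.ofList [c1], String.ofList [c2],
        String.ofList [c3], String.ofList [c4]] : Int))) ?_]
  · refine List.map_congr_left ?_
    intro k _
    simp
  · intro x hx
    have hmem : x ∈ [String.ofList [c0], String.ofList [c1], String.ofList [c2],
        String.ofList [c3], String.ofList [c4]] := (PySem.Set.mem_ofList _ _).1 hx
    have hpos : 0 < List.count x [String.ofList [c0], String.ofList [c1], String.ofList [c2],
        String.ofList [c3], String.ofList [c4]] := List.count_pos_iff.2 hmem
    simp only [decide_eq_decide]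
    omega
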